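-- pv_equiv track=rewrite | github.com/simka275/Advent-of-Code | 2021/day19.py | generate_orientations
-- ===== SOURCE A (Python) =====
-- def rotate_around_x_axis(coords):
--     x,y,z = coords
--     return (x,-z,y)
--
-- def rotate_around_y_axis(coords):
--     x,y,z = coords
--     return (-z,y,x)
--
-- def rotate_around_z_axis(coords):
--     x,y,z = coords
--     return (-y,x,z)
--
-- def generate_orientations(beacons):
--     res = [beacons]
--     current_beacons = beacons
--     for _ in range(3):
--         rotated_beacons = []
--         for beacon in current_beacons:
--             rotated_beacons.append(rotate_around_z_axis(beacon))
--         res.append(rotated_beacons)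
--         current_beacons = rotated_beacons
--
--     for current_beacons in res.copy():
--         for _ in range(3):
--             rotated_beacons = []
--             for beacon in current_beacons:
--                 rotated_beacons.append(rotate_around_x_axis(beacon))
--             res.append(rotated_beacons)
--             current_beacons = rotated_beacons
--
--     for current_beacons in res.copy():
--         for _ in range(3):
--             rotated_beacons = []
--             for beacon in current_beacons:
--                 rotated_beacons.append(rotate_around_y_axis(beacon))
--             res.append(rotated_beacons)
--             current_beacons = rotated_beacons
--     return res
-- ===== SOURCE B (Python) =====
-- _RZ = ((0, -1, 0), (1, 0, 0), (0, 0, 1))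
-- _RX = ((1, 0, 0), (0, 0, -1), (0, 1, 0))
-- _RY = ((0, 0, -1), (0, 1, 0), (1, 0, 0))
-- _I = ((1, 0, 0), (0, 1, 0), (0, 0, 1))
--
--
-- def _matmul(a, b):
--     return tuple(tuple(sum(a[i][k] * b[k][j] for k in range(3)) for j in range(3))
--                  for i in range(3))
--
--
-- def _apply(m, p):
--     x, y, z = p
--     return (m[0][0] * x + m[0][1] * y + m[0][2] * z,
--             m[1][0] * x + m[1][1] * y + m[1][2] * z,
--             m[2][0] * x + m[2][1] * y + m[2][2] * z)
--
--
-- def generate_orientations(beacons):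
--     # build the 64 orientation operators (same order, same duplicates as the
--     # incremental point-list rotations), then apply them in one uniform pass
--     ops = [_I]
--     cur = _I
--     for _ in range(3):
--         cur = _matmul(_RZ, cur)
--         ops.append(cur)
--     for cur in ops.copy():
--         for _ in range(3):
--             cur = _matmul(_RX, cur)
--             ops.append(cur)
--     for cur in ops.copy():
--         for _ in range(3):
--             cur = _matmul(_RY, cur)
--             ops.append(cur)
--     return [[_apply(m, b) for b in beacons] for m in ops]
-- ===== Notes on version B (the rewrite author's own statement) =====
-- stated objective: alternative
-- what changed: B precomputes the 64 orientation operators as 3x3 integer matrices (composed by the same three nested loops over the identity, preserving order and duplicates) and then produces the result in one uniform map over beacons, instead of A's incremental rotation of whole point lists.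
import Mathlib
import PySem

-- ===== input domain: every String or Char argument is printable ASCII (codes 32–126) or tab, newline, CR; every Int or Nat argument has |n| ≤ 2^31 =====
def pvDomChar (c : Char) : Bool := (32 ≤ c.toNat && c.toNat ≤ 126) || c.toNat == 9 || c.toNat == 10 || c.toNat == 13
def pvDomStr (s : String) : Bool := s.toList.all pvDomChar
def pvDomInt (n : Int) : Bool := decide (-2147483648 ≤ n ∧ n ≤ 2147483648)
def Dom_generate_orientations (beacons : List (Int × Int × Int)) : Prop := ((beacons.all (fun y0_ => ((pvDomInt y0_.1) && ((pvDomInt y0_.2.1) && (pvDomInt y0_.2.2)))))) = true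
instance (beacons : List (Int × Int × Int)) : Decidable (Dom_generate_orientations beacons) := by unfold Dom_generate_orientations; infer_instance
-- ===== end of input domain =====

-- B replaces A's incremental rotation of whole point lists by a precomputed table of 64
-- orientation matrices (built by the same loop structure over the identity, so order and
-- duplicates coincide) followed by one uniform map; objective: alternative decomposition.

-- ===== PORT A =====
def rotate_around_x_axis (c : Int × Int × Int) : Int × Int × Int := (c.1, -c.2.2, c.2.1)
def rotate_around_y_axis (c : Int × Int × Int) : Int × Int × Int := (-c.2.2, c.2.1, c.1)
def rotate_around_z_axis (c : Int × Int × Int) : Int × Int × Int := (-c.2.1, c.1, c.2.2)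

-- 'rotated=[]; for beacon in cur: rotated.append(rot(beacon))' ported as List.map
def generate_orientations (beacons : List (Int × Int × Int)) : List (List (Int × Int × Int)) :=
  let s1 := (List.range 3).foldl
    (fun (s : List (List (Int × Int × Int)) × List (Int × Int × Int)) _ =>
      let rotated := s.2.map rotate_around_z_axis
      (s.1 ++ [rotated], rotated)) ([beacons], beacons)
  let res1 := s1.1
  let res2 := res1.foldl (fun acc cur =>
      ((List.range 3).foldl
        (fun (s : List (List (Int × Int × Int)) × List (Int × Int × Int)) _ =>
          let rotated := s.2.map rotate_around_x_axis
          (s.1 ++ [rotated], rotated)) (acc, cur)).1) res1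
  let res3 := res2.foldl (fun acc cur =>
      ((List.range 3).foldl
        (fun (s : List (List (Int × Int × Int)) × List (Int × Int × Int)) _ =>
          let rotated := s.2.map rotate_around_y_axis
          (s.1 ++ [rotated], rotated)) (acc, cur)).1) res2
  res3

-- ===== PORT B =====
-- a 3x3 integer matrix as a triple of rows
abbrev PvM3 := (Int × Int × Int) × (Int × Int × Int) × (Int × Int × Int)

def pvRZ : PvM3 := ((0, -1, 0), (1, 0, 0), (0, 0, 1))
def pvRX : PvM3 := ((1, 0, 0), (0, 0, -1), (0, 1, 0))
def pvRY : PvM3 := ((0, 0, -1), (0, 1, 0), (1, 0, 0))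
def pvI : PvM3 := ((1, 0, 0), (0, 1, 0), (0, 0, 1))

-- generic 3x3 matrix product (Source B's _matmul, the k-sum written out)
def pvMatmul (a b : PvM3) : PvM3 :=
  ((a.1.1*b.1.1 + a.1.2.1*b.2.1.1 + a.1.2.2*b.2.2.1,
    a.1.1*b.1.2.1 + a.1.2.1*b.2.1.2.1 + a.1.2.2*b.2.2.2.1,
    a.1.1*b.1.2.2 + a.1.2.1*b.2.1.2.2 + a.1.2.2*b.2.2.2.2),
   (a.2.1.1*b.1.1 + a.2.1.2.1*b.2.1.1 + a.2.1.2.2*b.2.2.1,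
    a.2.1.1*b.1.2.1 + a.2.1.2.1*b.2.1.2.1 + a.2.1.2.2*b.2.2.2.1,
    a.2.1.1*b.1.2.2 + a.2.1.2.1*b.2.1.2.2 + a.2.1.2.2*b.2.2.2.2),
   (a.2.2.1*b.1.1 + a.2.2.2.1*b.2.1.1 + a.2.2.2.2*b.2.2.1,
    a.2.2.1*b.1.2.1 + a.2.2.2.1*b.2.1.2.1 + a.2.2.2.2*b.2.2.2.1,
    a.2.2.1*b.1.2.2 + a.2.2.2.1*b.2.1.2.2 + a.2.2.2.2*b.2.2.2.2))

-- Source B's _apply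
def pvApply (m : PvM3) (p : Int × Int × Int) : Int × Int × Int :=
  (m.1.1*p.1 + m.1.2.1*p.2.1 + m.1.2.2*p.2.2,
   m.2.1.1*p.1 + m.2.1.2.1*p.2.1 + m.2.1.2.2*p.2.2,
   m.2.2.1*p.1 + m.2.2.2.1*p.2.1 + m.2.2.2.2*p.2.2)

-- the 64 orientation operators, built by Source B's loops
def pvOps : List PvM3 :=
  let s1 := (List.range 3).foldl
    (fun (s : List PvM3 × PvM3) _ =>
      let cur := pvMatmul pvRZ s.2
      (s.1 ++ [cur], cur)) ([pvI], pvI)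
  let ops1 := s1.1
  let ops2 := ops1.foldl (fun acc cur =>
      ((List.range 3).foldl
        (fun (s : List PvM3 × PvM3) _ =>
          let c := pvMatmul pvRX s.2
          (s.1 ++ [c], c)) (acc, cur)).1) ops1
  let ops3 := ops2.foldl (fun acc cur =>
      ((List.range 3).foldl
        (fun (s : List PvM3 × PvM3) _ =>
          let c := pvMatmul pvRY s.2
          (s.1 ++ [c], c)) (acc, cur)).1) ops2
  ops3

def generate_orientations_alt (beacons : List (Int × Int × Int)) : List (List (Int × Int × Int)) :=
  pvOps.map (fun m => beacons.map (pvApply m))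

-- ===== PRECONDITION & SPEC =====
def Spec_generate_orientations (beacons : List (Int × Int × Int)) (out : List (List (Int × Int × Int))) : Prop := out = generate_orientations_alt beacons
instance (beacons : List (Int × Int × Int)) (out : List (List (Int × Int × Int))) : Decidable (Spec_generate_orientations beacons out) := by unfold Spec_generate_orientations; infer_instance

-- ===== CLAIM (what is proved, stated in full; the proofs are below) =====
def Claim_equal_generate_orientations : Prop := ∀ (beacons : List (Int × Int × Int)), Dom_generate_orientations beacons → Spec_generate_orientations beacons (generate_orientations beacons)

-- ===== LEMMAS AND PROOFS =====

theorem pv_comm_z (m : PvM3) (p : Int × Int × Int) :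
    pvApply (pvMatmul pvRZ m) p = rotate_around_z_axis (pvApply m p) := by
  simp [pvApply, pvMatmul, pvRZ, rotate_around_z_axis]; ring_nf

theorem pv_comm_x (m : PvM3) (p : Int × Int × Int) :
    pvApply (pvMatmul pvRX m) p = rotate_around_x_axis (pvApply m p) := by
  simp [pvApply, pvMatmul, pvRX, rotate_around_x_axis]; ring_nf

theorem pv_comm_y (m : PvM3) (p : Int × Int × Int) :
    pvApply (pvMatmul pvRY m) p = rotate_around_y_axis (pvApply m p) := by
  simp [pvApply, pvMatmul, pvRY, rotate_around_y_axis]; ring_nf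

theorem pv_fun_I : pvApply pvI = id := by
  funext p; simp [pvApply, pvI]

theorem pv_fun_z (m : PvM3) : pvApply (pvMatmul pvRZ m) = rotate_around_z_axis ∘ pvApply m :=
  funext (pv_comm_z m)

theorem pv_fun_x (m : PvM3) : pvApply (pvMatmul pvRX m) = rotate_around_x_axis ∘ pvApply m :=
  funext (pv_comm_x m)

theorem pv_fun_y (m : PvM3) : pvApply (pvMatmul pvRY m) = rotate_around_y_axis ∘ pvApply m :=
  funext (pv_comm_y m)

-- ===== VERDICT (by name: the statement is the Claim_ definition above) =====
theorem generate_orientations_spec : Claim_equal_generate_orientations := by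
  intro beacons _
  unfold Spec_generate_orientations generate_orientations generate_orientations_alt pvOps
  simp only [List.range_succ, List.range_zero, List.nil_append, List.foldl_cons,
    List.foldl_nil, List.map_cons, List.map_nil, List.cons_append, List.map_map]
  simp only [pv_fun_z, pv_fun_x, pv_fun_y, pv_fun_I, Function.comp_id,
    Function.comp_assoc, List.map_id]
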